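-- pv_equiv track=rewrite | github.com/Kvilt1/Snapchat-splitter | src/media_processing.py | build_timestamp_index
-- ===== SOURCE A (Python) =====
-- from collections import defaultdict
-- from typing import Dict, List, Optional, Set, Tuple, Any
--
-- def build_timestamp_index(conversations: Dict[str, List]) -> Tuple[List[int], Dict[int, List[Tuple]]]:
--     """
--     Build optimized index for O(log n) timestamp-based media mapping.
--
--     Returns:
--         sorted_timestamps: Sorted list of all message timestamps
--         timestamp_to_messages: Dict mapping timestamp to list of (conv_id, msg_idx)
--     """
--     timestamp_to_messages = defaultdict(list)
--
--     for conv_id, messages in conversations.items():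
--         for i, msg in enumerate(messages):
--             ts = int(msg.get("Created(microseconds)", 0))
--             if ts > 0:
--                 timestamp_to_messages[ts].append((conv_id, i))
--
--     # Sort timestamps for binary search
--     sorted_timestamps = sorted(timestamp_to_messages.keys())
--
--     return sorted_timestamps, timestamp_to_messages
-- ===== SOURCE B (Python) =====
-- from collections import defaultdict
--
--
-- def build_timestamp_index(conversations):
--     # Flatten once into (ts, conv_id, msg_idx) triples, keep positive timestamps,
--     # dedup the keys in first-occurrence order, then build each group by filtering.
--     entries = [(int(msg.get("Created(microseconds)", 0)), conv_id, i)
--                for conv_id, messages in conversations.items()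
--                for i, msg in enumerate(messages)]
--     entries = [e for e in entries if e[0] > 0]
--     keys = list(dict.fromkeys(ts for ts, _, _ in entries))
--     timestamp_to_messages = defaultdict(list)
--     for ts in keys:
--         timestamp_to_messages[ts] = [(c, i) for t, c, i in entries if t == ts]
--     return sorted(keys), timestamp_to_messages
-- ===== Notes on version B (the rewrite author's own statement) =====
-- stated objective: alternative
-- what changed: Replaces A's group-then-sort-keys nested loops with a flatten-filter-dedup-then-group-by-key decomposition: one flat (ts, conv_id, idx) entry list, first-occurrence key dedup, and each timestamp's group built by filtering the flat list.
import Mathlib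
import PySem

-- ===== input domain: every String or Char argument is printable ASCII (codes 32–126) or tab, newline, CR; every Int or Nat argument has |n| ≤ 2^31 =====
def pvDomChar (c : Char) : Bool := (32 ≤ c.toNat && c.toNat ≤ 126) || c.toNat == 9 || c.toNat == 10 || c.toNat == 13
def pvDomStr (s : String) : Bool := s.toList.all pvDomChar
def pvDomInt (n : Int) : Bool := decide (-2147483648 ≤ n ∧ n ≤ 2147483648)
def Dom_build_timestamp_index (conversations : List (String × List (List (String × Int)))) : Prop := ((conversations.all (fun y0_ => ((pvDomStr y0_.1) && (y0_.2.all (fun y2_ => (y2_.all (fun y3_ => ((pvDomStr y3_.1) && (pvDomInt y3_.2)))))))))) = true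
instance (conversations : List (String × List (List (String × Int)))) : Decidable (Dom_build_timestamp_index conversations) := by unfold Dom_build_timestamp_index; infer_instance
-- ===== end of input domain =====

-- B replaces A's group-then-sort-keys nested loops by flatten → filter → dedup keys → per-key grouping (alternative decomposition, not faster).

-- ===== PORT A =====
-- literal transliteration of A: nested loops appending into a defaultdict(list), then sorted keys.
-- int(msg.get(...)) is the identity here since the dict values are ints: ported as Dict.getD.
def build_timestamp_index (conversations : List (String × List (List (String × Int)))) : List Int × (List (Int × List (String × Int))) :=
  let d : PySem.Dict Int (List (String × Int)) :=
    conversations.foldl (fun d p =>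
      (PySem.List.enumerate p.2).foldl (fun d im =>
        let ts := PySem.Dict.getD (PySem.Dict.mk im.2) "Created(microseconds)" 0
        if ts > 0 then d.modify ts [] (fun l => l ++ [(p.1, im.1)]) else d) d)
      PySem.Dict.empty
  (PySem.List.sorted d.keys (fun x => x) false, d.items)

-- ===== PORT B =====
-- literal transliteration of B (Source B): flat entry list, filter ts > 0, dedup keys, group by filtering per key.
def build_timestamp_index_alt (conversations : List (String × List (List (String × Int)))) : List Int × (List (Int × List (String × Int))) :=
  let entries0 : List (Int × (String × Int)) :=
    conversations.flatMap (fun p =>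
      (PySem.List.enumerate p.2).map (fun im =>
        (PySem.Dict.getD (PySem.Dict.mk im.2) "Created(microseconds)" 0, (p.1, im.1))))
  let entries := entries0.filter (fun e => decide (e.1 > 0))
  let keys := PySem.List.dedup (entries.map (fun e => e.1))
  let d : PySem.Dict Int (List (String × Int)) :=
    keys.foldl (fun d k =>
      d.insert k ((entries.filter (fun e => e.1 == k)).map (fun e => e.2))) PySem.Dict.empty
  (PySem.List.sorted keys (fun x => x) false, d.items)

-- ===== PRECONDITION & SPEC =====
def Spec_build_timestamp_index (conversations : List (String × List (List (String × Int)))) (out : List Int × (List (Int × List (String × Int)))) : Prop := out = build_timestamp_index_alt conversations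
instance (conversations : List (String × List (List (String × Int)))) (out : List Int × (List (Int × List (String × Int)))) : Decidable (Spec_build_timestamp_index conversations out) := by unfold Spec_build_timestamp_index; infer_instance

-- ===== CLAIM (what is proved, stated in full; the proofs are below) =====
def Claim_equal_build_timestamp_index : Prop := ∀ (conversations : List (String × List (List (String × Int)))), Dom_build_timestamp_index conversations → Spec_build_timestamp_index conversations (build_timestamp_index conversations)

-- ===== LEMMAS AND PROOFS =====

-- A's nested loops are the fold of the defaultdict-append step over B's flat filtered entry list.
theorem buildA_dict_eq_flat_foldl (conversations : List (String × List (List (String × Int)))) :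
    conversations.foldl (fun d p =>
      (PySem.List.enumerate p.2).foldl (fun d im =>
        let ts := PySem.Dict.getD (PySem.Dict.mk im.2) "Created(microseconds)" 0
        if ts > 0 then d.modify ts [] (fun l => l ++ [(p.1, im.1)]) else d) d)
      (PySem.Dict.empty : PySem.Dict Int (List (String × Int)))
    =
    ((conversations.flatMap (fun p =>
      (PySem.List.enumerate p.2).map (fun im =>
        (PySem.Dict.getD (PySem.Dict.mk im.2) "Created(microseconds)" 0, (p.1, im.1))))).filter
        (fun e => decide (e.1 > 0))).foldl
      (fun d e => d.modify e.1 [] (fun l => l ++ [e.2])) PySem.Dict.empty := by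
  rw [List.foldl_filter, List.foldl_flatMap]
  simp only [List.foldl_map, decide_eq_true_eq]

-- the keys of A's defaultdict loop are the first-occurrence dedup of the entry timestamps
theorem dictA_keys (E : List (Int × (String × Int))) :
    (E.foldl (fun d e => d.modify e.1 [] (fun l => l ++ [e.2]))
      (PySem.Dict.empty : PySem.Dict Int (List (String × Int)))).keys
    = PySem.List.dedup (E.map (fun e => e.1)) := by
  have := PySem.Dict.keys_foldl_modify_key E (fun e => e.1) ([] : List (String × Int))
    (fun _ e l => l ++ [e.2]) PySem.Dict.empty
  simpa [PySem.Set.update_nil_left, PySem.List.dedup_eq_ofList] using this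

-- A's defaultdict loop, as an items list: each key maps to its group in entry order
theorem dictA_items (E : List (Int × (String × Int))) :
    (E.foldl (fun d e => d.modify e.1 [] (fun l => l ++ [e.2]))
      (PySem.Dict.empty : PySem.Dict Int (List (String × Int)))).items
    = (PySem.List.dedup (E.map (fun e => e.1))).map
        (fun k => (k, (E.filter (fun e => e.1 == k)).map (fun e => e.2))) := by
  set dA := E.foldl (fun d e => d.modify e.1 [] (fun l => l ++ [e.2]))
      (PySem.Dict.empty : PySem.Dict Int (List (String × Int))) with hdA
  have hkeys := dictA_keys E
  have hnodup : dA.keys.Nodup := by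
    rw [hdA.symm] at hkeys
    rw [hkeys, PySem.List.dedup_eq_ofList]
    exact PySem.Set.nodup_ofList _
  rw [PySem.Dict.items_eq_map_keys dA hnodup ([] : List (String × Int))]
  rw [hdA.symm] at hkeys
  rw [hkeys]
  refine List.map_congr_left (fun k _ => ?_)
  have := PySem.Dict.getD_foldl_modify_append E PySem.Dict.empty k
  rw [hdA]
  simp only [this, PySem.Dict.getD_empty, List.nil_append]

-- B's insert loop over the fresh, distinct dedup keys appends exactly those items
theorem dictB_items (E : List (Int × (String × Int))) :
    ((PySem.List.dedup (E.map (fun e => e.1))).foldl (fun d k =>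
      d.insert k ((E.filter (fun e => e.1 == k)).map (fun e => e.2)))
      (PySem.Dict.empty : PySem.Dict Int (List (String × Int)))).items
    = (PySem.List.dedup (E.map (fun e => e.1))).map
        (fun k => (k, (E.filter (fun e => e.1 == k)).map (fun e => e.2))) := by
  have := PySem.Dict.items_foldl_insert_fresh
    (PySem.List.dedup (E.map (fun e => e.1))) (fun k => k)
    (fun k => (E.filter (fun e => e.1 == k)).map (fun e => e.2))
    (PySem.Dict.empty : PySem.Dict Int (List (String × Int)))
    (fun k _ => by simp)
    (by rw [List.map_id', PySem.List.dedup_eq_ofList]; exact PySem.Set.nodup_ofList _)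
  simpa using this

theorem build_timestamp_index_eq_alt (conversations : List (String × List (List (String × Int)))) :
    build_timestamp_index conversations = build_timestamp_index_alt conversations := by
  simp only [build_timestamp_index, build_timestamp_index_alt]
  rw [buildA_dict_eq_flat_foldl, dictA_keys, dictA_items, dictB_items]

-- ===== VERDICT (by name: the statement is the Claim_ definition above) =====
theorem build_timestamp_index_spec : Claim_equal_build_timestamp_index := by
  intro conversations _
  unfold Spec_build_timestamp_index
  exact build_timestamp_index_eq_alt conversations
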